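-- pv_equiv track=rewrite | github.com/oliwiakaluzinska/prg-basics | mocktest3-2/p1.py | f
-- ===== SOURCE A (Python) =====
-- def f(n):
--     arr = []
--     n = str(n)
--     for i in n:
--         if int(i) % 2 != 0:
--             arr.append(int(i))
--     if arr == []:
--         return -1
--     else:
--       return max(arr)-min(arr)
-- ===== SOURCE B (Python) =====
-- def f(n):
--     lo = hi = None
--     m = n
--     while m > 0:
--         d = m % 10
--         if d % 2 != 0:
--             if lo is None or d < lo:
--                 lo = d
--             if hi is None or d > hi:
--                 hi = d
--         m //= 10
--     return -1 if hi is None else hi - lo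
-- ===== Notes on version B (the rewrite author's own statement) =====
-- stated objective: alternative
-- what changed: B extracts digits arithmetically (m % 10, m //= 10) and threads running min/max scalars through one loop instead of converting n to a string, building a list of odd digits and calling max()/min() on it.
import Mathlib
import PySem

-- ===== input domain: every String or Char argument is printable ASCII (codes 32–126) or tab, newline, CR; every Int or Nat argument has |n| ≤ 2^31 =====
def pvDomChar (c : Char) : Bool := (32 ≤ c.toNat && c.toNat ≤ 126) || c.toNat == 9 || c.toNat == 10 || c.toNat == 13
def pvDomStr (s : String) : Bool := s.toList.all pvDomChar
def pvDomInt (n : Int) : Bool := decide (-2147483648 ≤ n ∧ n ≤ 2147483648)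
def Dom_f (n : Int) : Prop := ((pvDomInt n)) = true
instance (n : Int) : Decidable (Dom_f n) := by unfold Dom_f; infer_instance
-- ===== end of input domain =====

-- B replaces A's string pass + list + max/min with arithmetic digit extraction (m % 10, m //= 10)
-- threading running extrema; equal return values proved for n ≥ 0 (A raises ValueError on negative n).

-- ===== PORT A =====
-- str(n) → chars; int(i) → ofChars?; its none branch (non-digit char) is unreachable under Pre_f,
-- where every character of str(n) is a digit, so leaving arr unchanged there is never exercised.
def f (n : Int) : Int :=
  let s := PySem.Int.toChars n
  let arr : List Int := s.foldl (fun arr c =>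
    match PySem.Int.ofChars? [c] with
    | some v => if PySem.Int.mod v 2 ≠ 0 then arr ++ [v] else arr
    | none => arr) []
  if arr = [] then -1
  else (PySem.List.max? arr (fun y => y)).getD 0 - (PySem.List.min? arr (fun y => y)).getD 0

-- ===== PORT B =====
-- while m > 0: d = m % 10; update lo/hi if d odd; m //= 10
def fAltLoop (m : Int) (lo hi : Option Int) : Option Int × Option Int :=
  if _h : 0 < m then
    let d := PySem.Int.mod m 10
    let lo' := if PySem.Int.mod d 2 ≠ 0 then
        (match lo with | none => some d | some v => if d < v then some d else some v)
      else lo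
    let hi' := if PySem.Int.mod d 2 ≠ 0 then
        (match hi with | none => some d | some v => if v < d then some d else some v)
      else hi
    fAltLoop (PySem.Int.floordiv m 10) lo' hi'
  else (lo, hi)
termination_by m.toNat
decreasing_by
  rw [PySem.Int.floordiv_eq_ediv_of_pos (by omega : (0:Int) < 10)]
  omega

-- lo is some whenever hi is some (B sets them together), so the first branch is the Python 'hi - lo'.
def f_alt (n : Int) : Int :=
  match fAltLoop n none none with
  | (some l, some h) => h - l
  | (_, _) => -1

-- ===== PRECONDITION & SPEC =====
-- Pre_f excludes exactly the negative n, on which A raises ValueError (int('-')).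
def Pre_f (n : Int) : Prop := 0 ≤ n
instance (n : Int) : Decidable (Pre_f n) := by unfold Pre_f; infer_instance
def pvWitness_f : Int := (135)

def Spec_f (n : Int) (out : Int) : Prop := out = f_alt n
instance (n : Int) (out : Int) : Decidable (Spec_f n out) := by unfold Spec_f; infer_instance

-- ===== CLAIM (what is proved, stated in full; the proofs are below) =====
def Claim_equal_f : Prop := ∀ (n : Int), Dom_f n → Pre_f n → Spec_f n (f n)

-- ===== LEMMAS AND PROOFS =====

-- most-significant-first decimal digits of a natural number (single digit for n < 10)
def digsMSB (n : Nat) : List Nat :=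
  if _h : n < 10 then [n] else digsMSB (n / 10) ++ [n % 10]
termination_by n
decreasing_by omega

theorem digsMSB_lt : ∀ (n : Nat), ∀ d ∈ digsMSB n, d < 10 := by
  intro n
  induction n using Nat.strong_induction_on with
  | _ n ih =>
    intro d hd
    rw [digsMSB] at hd
    split at hd
    · rename_i h; simp at hd; omega
    · rename_i h
      rcases List.mem_append.mp hd with h1 | h1
      · exact ih (n / 10) (by omega) d h1
      · simp at h1; omega

theorem toDigitsCore_eq : ∀ (fu : Nat), ∀ n < fu, ∀ (l : List Char),
    Nat.toDigitsCore 10 fu n l = (digsMSB n).map Nat.digitChar ++ l := by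
  intro fu
  induction fu with
  | zero => omega
  | succ fu ih =>
    intro n hn l
    rw [Nat.toDigitsCore]
    by_cases h10 : n / 10 = 0
    · rw [if_pos h10, digsMSB, dif_pos (by omega), Nat.mod_eq_of_lt (by omega)]
      simp
    · have hlt : n / 10 < fu := by
        have := Nat.div_lt_self (by omega : 0 < n) (by omega : 1 < 10)
        omega
      rw [if_neg h10, digsMSB, dif_neg (by omega), ih (n / 10) hlt]
      simp

theorem toChars_eq (n : Nat) :
    PySem.Int.toChars (n : Int) = (digsMSB n).map Nat.digitChar := by
  rw [PySem.Int.toChars, if_neg (by omega)]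
  show Nat.toDigits 10 ((n : Int).toNat) = _
  rw [Int.toNat_natCast, Nat.toDigits, toDigitsCore_eq (n + 1) n (by omega)]
  simp

theorem ofChars?_digitChar (d : Nat) (hd : d < 10) :
    PySem.Int.ofChars? [Nat.digitChar d] = some (d : Int) := by
  interval_cases d <;> decide

-- the odd decimal digits of n, most significant first, as Ints
def oddInts (n : Nat) : List Int :=
  ((digsMSB n).filter (fun d => d % 2 == 1)).map (fun d => Int.ofNat d)

theorem mod_two_cast (d : Nat) :
    PySem.Int.mod (Int.ofNat d) 2 = ((d % 2 : Nat) : Int) := by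
  exact_mod_cast PySem.Int.mod_natCast d 2

theorem f_eq (n : Nat) :
    f (n : Int) = (match oddInts n with
      | [] => -1
      | x :: t => t.foldl max x - t.foldl min x) := by
  rw [f]
  rw [toChars_eq, List.foldl_map]
  have hcong :
      (digsMSB n).foldl (fun (arr : List Int) (y : Nat) =>
          match PySem.Int.ofChars? [Nat.digitChar y] with
          | some v => if PySem.Int.mod v 2 ≠ 0 then arr ++ [v] else arr
          | none => arr) []
        = (digsMSB n).foldl (fun (arr : List Int) (d : Nat) =>
          if (d % 2 == 1) then arr ++ [Int.ofNat d] else arr) [] := by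
    apply PySem.List.foldl_congr_mem
    intro acc d hd
    rw [ofChars?_digitChar d (digsMSB_lt n d hd)]
    show (if PySem.Int.mod (Int.ofNat d) 2 ≠ 0 then acc ++ [Int.ofNat d] else acc) = _
    rw [mod_two_cast]
    by_cases hp : d % 2 = 1
    · rw [if_pos (by omega), if_pos (by simp [hp])]
    · rw [if_neg (by omega), if_neg (by simp; omega)]
  rw [hcong, PySem.List.foldl_append_if (fun d => d % 2 == 1) (fun d => Int.ofNat d),
    List.nil_append]
  have h' : ((digsMSB n).filter (fun d => d % 2 == 1)).map (fun d => Int.ofNat d)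
      = oddInts n := rfl
  rw [h']
  cases h : oddInts n with
  | nil => simp
  | cons x t =>
    rw [if_neg (by simp), PySem.List.max?_id_cons, PySem.List.min?_id_cons]
    rfl

-- B-side state updates (the inline matches of fAltLoop)
def updLo (o : Option Int) (d : Int) : Option Int :=
  match o with | none => some d | some v => if d < v then some d else some v
def updHi (o : Option Int) (d : Int) : Option Int :=
  match o with | none => some d | some v => if v < d then some d else some v
def bstep (st : Option Int × Option Int) (d : Int) : Option Int × Option Int :=
  if PySem.Int.mod d 2 ≠ 0 then (updLo st.1 d, updHi st.2 d) else st

theorem bstep_pair (lo hi : Option Int) (d : Int) :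
    bstep (lo, hi) d = (if PySem.Int.mod d 2 ≠ 0 then updLo lo d else lo,
                        if PySem.Int.mod d 2 ≠ 0 then updHi hi d else hi) := by
  simp only [bstep]
  split_ifs <;> rfl

theorem loop_eq : ∀ (m : Nat), 0 < m → ∀ (lo hi : Option Int),
    fAltLoop (m : Int) lo hi
      = ((digsMSB m).reverse.map (fun d => Int.ofNat d)).foldl bstep (lo, hi) := by
  intro m
  induction m using Nat.strong_induction_on with
  | _ m ih =>
    intro hm lo hi
    rw [fAltLoop, dif_pos (by exact_mod_cast hm)]
    have hmod : PySem.Int.mod (m : Int) 10 = ((m % 10 : Nat) : Int) := by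
      exact_mod_cast PySem.Int.mod_natCast m 10
    have hdiv : PySem.Int.floordiv (m : Int) 10 = ((m / 10 : Nat) : Int) := by
      exact_mod_cast PySem.Int.floordiv_natCast m 10
    rw [hmod, hdiv]
    by_cases h10 : m / 10 = 0
    · have hlt : m < 10 := by omega
      rw [h10, digsMSB, dif_pos hlt, Nat.mod_eq_of_lt hlt]
      rw [fAltLoop, dif_neg (by norm_num)]
      simp only [List.reverse_singleton, List.map_cons, List.map_nil,
        List.foldl_cons, List.foldl_nil]
      rw [bstep_pair]
      rfl
    · rw [digsMSB, dif_neg (by omega)]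
      simp only [List.reverse_append, List.reverse_singleton, List.map_cons,
        List.singleton_append, List.foldl_cons]
      rw [bstep_pair, ih (m / 10) (by
          have := Nat.div_lt_self (by omega : 0 < m) (by omega : 1 < 10); omega)
        (by omega)]
      rfl

theorem updLo_some (a x : Int) : updLo (some a) x = some (min a x) := by
  show (if x < a then some x else some a) = _
  rw [min_def]
  split_ifs <;> first | rfl | (congr 1; omega)

theorem updHi_some (a x : Int) : updHi (some a) x = some (max a x) := by
  show (if a < x then some x else some a) = _
  rw [max_def]
  split_ifs <;> first | rfl | (congr 1; omega)

theorem updLo_comm (o : Option Int) (x y : Int) :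
    updLo (updLo o y) x = updLo (updLo o x) y := by
  cases o with
  | none =>
    rw [show updLo none y = some y from rfl, show updLo none x = some x from rfl,
      updLo_some, updLo_some, min_comm]
  | some v =>
    rw [updLo_some, updLo_some, updLo_some, updLo_some, min_right_comm]

theorem updHi_comm (o : Option Int) (x y : Int) :
    updHi (updHi o y) x = updHi (updHi o x) y := by
  cases o with
  | none =>
    rw [show updHi none y = some y from rfl, show updHi none x = some x from rfl,
      updHi_some, updHi_some, max_comm]
  | some v =>
    rw [updHi_some, updHi_some, updHi_some, updHi_some, max_right_comm]

theorem foldl_updLo_bubble : ∀ (L : List Int) (o : Option Int) (x : Int),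
    updLo (L.foldl updLo o) x = L.foldl updLo (updLo o x) := by
  intro L
  induction L with
  | nil => intro o x; rfl
  | cons y L ih =>
    intro o x
    simp only [List.foldl_cons]
    rw [ih, updLo_comm]

theorem foldl_updHi_bubble : ∀ (L : List Int) (o : Option Int) (x : Int),
    updHi (L.foldl updHi o) x = L.foldl updHi (updHi o x) := by
  intro L
  induction L with
  | nil => intro o x; rfl
  | cons y L ih =>
    intro o x
    simp only [List.foldl_cons]
    rw [ih, updHi_comm]

theorem foldl_updLo_reverse : ∀ (L : List Int) (o : Option Int),
    L.reverse.foldl updLo o = L.foldl updLo o := by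
  intro L
  induction L with
  | nil => intro o; rfl
  | cons x L ih =>
    intro o
    rw [List.reverse_cons, List.foldl_append, ih, List.foldl_cons]
    show updLo (List.foldl updLo o L) x = _
    exact foldl_updLo_bubble L o x

theorem foldl_updHi_reverse : ∀ (L : List Int) (o : Option Int),
    L.reverse.foldl updHi o = L.foldl updHi o := by
  intro L
  induction L with
  | nil => intro o; rfl
  | cons x L ih =>
    intro o
    rw [List.reverse_cons, List.foldl_append, ih, List.foldl_cons]
    show updHi (List.foldl updHi o L) x = _
    exact foldl_updHi_bubble L o x

theorem foldl_bstep_pair : ∀ (ds : List Nat), (∀ d ∈ ds, d < 10) →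
    ∀ (st : Option Int × Option Int),
    (ds.map (fun d => Int.ofNat d)).foldl bstep st
      = (((ds.filter (fun d => d % 2 == 1)).map (fun d => Int.ofNat d)).foldl updLo st.1,
         ((ds.filter (fun d => d % 2 == 1)).map (fun d => Int.ofNat d)).foldl updHi st.2) := by
  intro ds
  induction ds with
  | nil => intro _ st; rfl
  | cons d ds ih =>
    intro hds st
    have hd : d < 10 := hds d (List.mem_cons_self ..)
    have ihds : ∀ d ∈ ds, d < 10 := fun d h => hds d (List.mem_cons_of_mem _ h)
    simp only [List.map_cons, List.foldl_cons, List.filter_cons]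
    by_cases hp : d % 2 = 1
    · rw [if_pos (by simp [hp]), ih ihds]
      simp only [List.map_cons, List.foldl_cons]
      congr 1 <;> (rw [bstep, if_pos (by rw [mod_two_cast]; omega)])
    · rw [if_neg (by simp; omega), ih ihds]
      congr 1 <;> (rw [bstep, if_neg (by rw [mod_two_cast]; simp; omega)])

theorem foldl_updLo_some : ∀ (t : List Int) (a : Int),
    t.foldl updLo (some a) = some (t.foldl min a) := by
  intro t
  induction t with
  | nil => intro a; rfl
  | cons x t ih =>
    intro a
    rw [List.foldl_cons, updLo_some, ih, List.foldl_cons]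

theorem foldl_updHi_some : ∀ (t : List Int) (a : Int),
    t.foldl updHi (some a) = some (t.foldl max a) := by
  intro t
  induction t with
  | nil => intro a; rfl
  | cons x t ih =>
    intro a
    rw [List.foldl_cons, updHi_some, ih, List.foldl_cons]

theorem f_alt_eq (n : Nat) (hn : 0 < n) :
    f_alt (n : Int) = (match oddInts n with
      | [] => -1
      | x :: t => t.foldl max x - t.foldl min x) := by
  rw [f_alt, loop_eq n hn]
  rw [foldl_bstep_pair _ (fun d h => digsMSB_lt n d (List.mem_reverse.mp h))]
  rw [List.filter_reverse, List.map_reverse, foldl_updLo_reverse, foldl_updHi_reverse]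
  cases h : oddInts n with
  | nil =>
    have h' := h
    unfold oddInts at h'
    rw [h']
    rfl
  | cons x t =>
    have h' := h
    unfold oddInts at h'
    rw [h']
    show (match (t.foldl updLo (updLo none x), t.foldl updHi (updHi none x)) with
          | (some l, some h) => h - l | (_, _) => -1) = _
    rw [show updLo none x = some x from rfl, show updHi none x = some x from rfl,
      foldl_updLo_some, foldl_updHi_some]

-- ===== VERDICT (by name: the statement is the Claim_ definition above) =====
theorem f_spec : Claim_equal_f := by
  intro n _ hpre
  unfold Spec_f
  obtain ⟨m, rfl⟩ := Int.eq_ofNat_of_zero_le hpre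
  rcases Nat.eq_zero_or_pos m with rfl | hm
  · show f 0 = f_alt 0
    unfold f_alt
    rw [show fAltLoop 0 none none = (none, none) by rw [fAltLoop]; decide]
    decide
  · rw [f_eq, f_alt_eq m hm]
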